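-- pv_equiv track=rewrite | github.com/wyattowalsh/proxywhirl | proxywhirl/fetchers.py | _is_valid_ip_port
-- ===== SOURCE A (Python) =====
-- def _is_valid_ip_port(ip_str: str, port_str: str) -> bool:
--     """Validate IP address octets (0-255) and port range (1-65535).
--
--     Args:
--         ip_str: IP address string (e.g., "192.168.1.1")
--         port_str: Port number string (e.g., "8080")
--
--     Returns:
--         True if IP and port are valid, False otherwise
--     """
--     # Validate each IP octet is 0-255
--     octets = ip_str.split(".")
--     if len(octets) != 4:
--         return False
--
--     for octet in octets:
--         try:
--             value = int(octet)
--             if value < 0 or value > 255: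
--                 return False
--             # Reject leading zeros (e.g., "01", "001") except for "0" itself
--             if octet != str(value):
--                 return False
--         except ValueError:
--             return False
--
--     # Validate port is 1-65535
--     try:
--         port = int(port_str)
--         if port < 1 or port > 65535:
--             return False
--     except ValueError:
--         return False
--
--     return True
-- ===== SOURCE B (Python) =====
-- def _is_valid_ip_port(ip_str: str, port_str: str) -> bool:
--     """Single left-to-right scan of the IP string (no split, no per-octet int());
--     port still validated via int() to keep Python's int-literal semantics."""
--     dots = 0
--     ndigits = 0
--     value = 0
--     starts_zero = False
--     for ch in ip_str + ".":
--         if ch == ".":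
--             if ndigits == 0 or value > 255 or (starts_zero and ndigits > 1):
--                 return False
--             dots += 1
--             ndigits = 0
--             value = 0
--             starts_zero = False
--         elif "0" <= ch <= "9":
--             if ndigits == 0:
--                 starts_zero = ch == "0"
--             value = value * 10 + (ord(ch) - 48)
--             ndigits += 1
--         else:
--             return False
--     if dots != 4:
--         return False
--     try:
--         port = int(port_str)
--     except ValueError:
--         return False
--     if port < 1 or port > 65535:
--         return False
--     return True
-- ===== Notes on version B (the rewrite author's own statement) =====
-- stated objective: alternative
-- what changed: A splits the IP on '.' and validates each octet via int() plus a canonical-string comparison; B validates the IP in a single left-to-right character scan (dot count, digit count, running value, leading-zero flag) with no intermediate list and no per-octet int(), keeping the int()-based port check.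
import Mathlib
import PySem

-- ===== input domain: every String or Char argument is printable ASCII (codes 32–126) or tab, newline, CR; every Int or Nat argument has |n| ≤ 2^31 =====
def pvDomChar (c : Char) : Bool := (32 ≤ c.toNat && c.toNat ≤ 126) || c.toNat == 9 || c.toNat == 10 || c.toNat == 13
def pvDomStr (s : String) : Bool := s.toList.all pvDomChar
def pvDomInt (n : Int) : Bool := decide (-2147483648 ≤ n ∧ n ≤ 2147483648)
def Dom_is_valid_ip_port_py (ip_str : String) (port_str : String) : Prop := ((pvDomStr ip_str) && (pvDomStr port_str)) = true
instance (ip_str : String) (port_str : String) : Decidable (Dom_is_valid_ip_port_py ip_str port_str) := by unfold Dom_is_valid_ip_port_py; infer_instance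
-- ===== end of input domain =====

-- B replaces A's split(".")-then-int() octet loop by a single left-to-right character scan of the IP string (objective: alternative; the port check stays int()-based).

-- ===== PORT A =====
-- one octet of A's loop body: int(octet), range check, canonical-form ("no leading zeros") check
def pvOctetOk (o : List Char) : Bool :=
  match PySem.Int.ofChars? o with
  | none => false
  | some v =>
    if v < 0 || 255 < v then false
    else if o ≠ PySem.Int.toChars v then false
    else true

def is_valid_ip_port_py (ip_str : String) (port_str : String) : Bool :=
  let octets := PySem.Chars.splitOn ip_str.toList ['.']
  if octets.length ≠ 4 then false
  else if octets.all pvOctetOk then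
    match PySem.Int.ofStr? port_str with
    | none => false
    | some port => if port < 1 || 65535 < port then false else true
  else false

-- ===== PORT B =====
-- B's for-loop over ip_str + ".": state (dots, ndigits, value, starts_zero); none = early `return False`
def pvScanB : List Char → Int → Int → Int → Bool → Option Int
  | [], dots, _, _, _ => some dots
  | c :: cs, dots, nd, v, sz =>
    if c = '.' then
      if nd = 0 || 255 < v || (sz && 1 < nd) then none
      else pvScanB cs (dots + 1) 0 0 false
    else if '0' ≤ c && c ≤ '9' then
      pvScanB cs dots (nd + 1) (v * 10 + ((c.toNat : Int) - 48)) (if nd = 0 then decide (c = '0') else sz)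
    else none

def is_valid_ip_port_py_alt (ip_str : String) (port_str : String) : Bool :=
  match pvScanB (ip_str.toList ++ ['.']) 0 0 0 false with
  | none => false
  | some dots =>
    if dots ≠ 4 then false
    else
      match PySem.Int.ofStr? port_str with
      | none => false
      | some port => if port < 1 || 65535 < port then false else true

-- ===== PRECONDITION & SPEC =====
def Spec_is_valid_ip_port_py (ip_str : String) (port_str : String) (out : Bool) : Prop := out = is_valid_ip_port_py_alt ip_str port_str
instance (ip_str : String) (port_str : String) (out : Bool) : Decidable (Spec_is_valid_ip_port_py ip_str port_str out) := by unfold Spec_is_valid_ip_port_py; infer_instance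

-- ===== CLAIM (what is proved, stated in full; the proofs are below) =====
def Claim_equal_is_valid_ip_port_py : Prop := ∀ (ip_str : String) (port_str : String), Dom_is_valid_ip_port_py ip_str port_str → Spec_is_valid_ip_port_py ip_str port_str (is_valid_ip_port_py ip_str port_str)

-- ===== LEMMAS AND PROOFS =====

-- proof-side helpers
def pvIsDig (c : Char) : Bool := '0' ≤ c && c ≤ '9'
def pvValFrom (a : Int) (o : List Char) : Int := o.foldl (fun x c => x * 10 + ((c.toNat : Int) - 48)) a
def pvVal (o : List Char) : Int := pvValFrom 0 o
def pvOkOct (o : List Char) : Bool :=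
  !o.isEmpty && o.all pvIsDig && !(decide (o.head? = some '0') && 1 < o.length) && !(255 < pvVal o)
def pvDigits : List Char := ['0','1','2','3','4','5','6','7','8','9']
-- reference split on '.' (structural)
def pvSplit : List Char → List (List Char)
  | [] => [[]]
  | c :: r => if c = '.' then [] :: pvSplit r else (pvSplit r).modifyHead (c :: ·)

theorem pvSplit_ne_nil (cs : List Char) : pvSplit cs ≠ [] := by
  induction cs with
  | nil => simp [pvSplit]
  | cons c r ih =>
    simp only [pvSplit]
    split
    · simp
    · cases h : pvSplit r with
      | nil => exact absurd h ih
      | cons a t => simp [List.modifyHead]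

theorem pvSplitOn_go_unf (sep : List Char) (fuel : Nat) (l cur : List Char) (acc : List (List Char)) :
    PySem.Chars.splitOn.go sep (fuel+1) l cur acc =
      match l with
      | [] => (cur.reverse :: acc).reverse
      | c :: rest =>
        if sep.isPrefixOf l then PySem.Chars.splitOn.go sep fuel (l.drop sep.length) [] (cur.reverse :: acc)
        else PySem.Chars.splitOn.go sep fuel rest (c :: cur) acc := by
  cases l <;> simp [PySem.Chars.splitOn.go]

theorem pvSplitOn_go_eq (l : List Char) : ∀ (fuel : Nat) (cur : List Char) (acc : List (List Char)),
    l.length < fuel →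
    PySem.Chars.splitOn.go ['.'] fuel l cur acc = acc.reverse ++ (pvSplit l).modifyHead (cur.reverse ++ ·) := by
  induction l with
  | nil =>
    intro fuel cur acc hf
    cases fuel with
    | zero => omega
    | succ f => simp [pvSplitOn_go_unf, pvSplit]
  | cons c rest ih =>
    intro fuel cur acc hf
    cases fuel with
    | zero => simp at hf
    | succ f =>
      rw [pvSplitOn_go_unf]
      by_cases hc : c = '.'
      · subst hc
        have hpre : List.isPrefixOf ['.'] ('.' :: rest) = true := by simp [List.isPrefixOf]
        simp only [hpre, if_pos]
        rw [show List.drop ['.'].length ('.' :: rest) = rest from rfl]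
        rw [ih f [] ((cur.reverse :: acc)) (by simp at hf ⊢; omega)]
        cases h : pvSplit rest with
        | nil => exact absurd h (pvSplit_ne_nil rest)
        | cons a t => simp [pvSplit, h, List.modifyHead]
      · have hpre : List.isPrefixOf ['.'] (c :: rest) = false := by
          simp [List.isPrefixOf]; exact fun h => absurd h.symm hc
        simp only [hpre, Bool.false_eq_true, if_false]
        rw [ih f (c :: cur) acc (by simp at hf ⊢; omega)]
        cases h : pvSplit rest with
        | nil => exact absurd h (pvSplit_ne_nil rest)
        | cons a t => simp [pvSplit, h, hc, List.modifyHead]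

theorem pvSplitOn_eq (cs : List Char) : PySem.Chars.splitOn cs ['.'] = pvSplit cs := by
  have h := pvSplitOn_go_eq cs (cs.length + 1) [] [] (by omega)
  rw [PySem.Chars.splitOn, h]
  cases h2 : pvSplit cs with
  | nil => exact absurd h2 (pvSplit_ne_nil cs)
  | cons a t => simp [List.modifyHead]

-- === octet characterisation: A's per-octet test equals B's per-octet condition ===
theorem pvDig_mem (c : Char) (h : pvIsDig c = true) : c ∈ pvDigits := by
  simp [pvIsDig, Char.le_def] at h
  have h48 : 48 ≤ c.toNat := by exact_mod_cast h.1
  have h57 : c.toNat ≤ 57 := by exact_mod_cast h.2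
  have hc : c = Char.ofNat c.toNat := by rw [Char.ofNat_toNat]
  interval_cases hn : c.toNat <;> simp [pvDigits, hc]

theorem pvValFrom_nonneg (o : List Char) : ∀ a : Int, 0 ≤ a → o.all pvIsDig = true → 0 ≤ pvValFrom a o := by
  induction o with
  | nil => intro a ha _; simpa [pvValFrom] using ha
  | cons c t ih =>
    intro a ha hall
    simp only [List.all_cons, Bool.and_eq_true] at hall
    have hc : (48 : Int) ≤ (c.toNat : Int) := by
      have := hall.1; simp [pvIsDig, Char.le_def] at this
      exact_mod_cast this.1
    have : pvValFrom a (c :: t) = pvValFrom (a * 10 + ((c.toNat : Int) - 48)) t := by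
      simp [pvValFrom]
    rw [this]
    exact ih _ (by nlinarith) hall.2

theorem pvValFrom_lower (o : List Char) : ∀ a : Int, 0 ≤ a → o.all pvIsDig = true →
    a * 10 ^ o.length ≤ pvValFrom a o := by
  induction o with
  | nil => intro a _ _; simp [pvValFrom]
  | cons c t ih =>
    intro a ha hall
    simp only [List.all_cons, Bool.and_eq_true] at hall
    have hc : (48 : Int) ≤ (c.toNat : Int) := by
      have := hall.1; simp [pvIsDig, Char.le_def] at this
      exact_mod_cast this.1
    have step : pvValFrom a (c :: t) = pvValFrom (a * 10 + ((c.toNat : Int) - 48)) t := by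
      simp [pvValFrom]
    rw [step]
    have h1 := ih (a * 10 + ((c.toNat : Int) - 48)) (by nlinarith) hall.2
    have hpow : (0 : Int) ≤ 10 ^ t.length := by positivity
    calc a * 10 ^ (c :: t).length = (a * 10) * 10 ^ t.length := by
          simp [List.length_cons, pow_succ]; ring
      _ ≤ (a * 10 + ((c.toNat : Int) - 48)) * 10 ^ t.length := by nlinarith
      _ ≤ pvValFrom (a * 10 + ((c.toNat : Int) - 48)) t := h1

-- a valid octet has at most 3 characters
theorem pvOkOct_len (o : List Char) (h : pvOkOct o = true) : o.length ≤ 3 := by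
  by_contra hlen
  simp only [pvOkOct, Bool.and_eq_true, Bool.not_eq_true', decide_eq_false_iff_not] at h
  obtain ⟨⟨⟨hne, hall⟩, hlead⟩, hval⟩ := h
  cases o with
  | nil => simp at hne
  | cons c t =>
    simp only [List.all_cons, Bool.and_eq_true] at hall
    have hc48 : (48 : Int) ≤ (c.toNat : Int) := by
      have := hall.1; simp [pvIsDig, Char.le_def] at this; exact_mod_cast this.1
    have hc0 : c ≠ '0' := by
      intro hceq; subst hceq
      simp at hlead
      simp [hlead] at hlen
    have hc49 : (49 : Int) ≤ (c.toNat : Int) := by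
      rcases lt_or_eq_of_le hc48 with h | h
      · omega
      · exfalso; apply hc0
        have h48' : c.toNat = 48 := by exact_mod_cast h.symm
        rw [← Char.ofNat_toNat c, h48']
    have hstep : pvVal (c :: t) = pvValFrom ((c.toNat : Int) - 48) t := by
      simp [pvVal, pvValFrom]
    have hlow := pvValFrom_lower t ((c.toNat : Int) - 48) (by omega) hall.2
    have hpow : (10 : Int) ^ 3 ≤ 10 ^ t.length := by
      apply pow_le_pow_right₀ (by norm_num)
      simp at hlen; omega
    have : (1000 : Int) ≤ pvVal (c :: t) := by
      rw [hstep]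
      calc (1000 : Int) = 1 * 10 ^ 3 := by norm_num
        _ ≤ 1 * 10 ^ t.length := by simpa using hpow
        _ ≤ ((c.toNat : Int) - 48) * 10 ^ t.length := by nlinarith [pow_pos (show (0:Int) < 10 by norm_num) t.length]
        _ ≤ pvValFrom ((c.toNat : Int) - 48) t := hlow
    simp at hval; omega

set_option maxHeartbeats 1000000 in
theorem pvE1 : (pvDigits.all (fun a =>
    decide (pvOkOct [a] = true → [a] = PySem.Int.toChars (pvVal [a])))) = true := by decide
set_option maxHeartbeats 1000000 in
theorem pvE2 : (pvDigits.all (fun a => pvDigits.all (fun b =>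
    decide (pvOkOct [a,b] = true → [a,b] = PySem.Int.toChars (pvVal [a,b]))))) = true := by decide
set_option maxHeartbeats 1000000 in
theorem pvE3 : (pvDigits.all (fun a => pvDigits.all (fun b => pvDigits.all (fun c =>
    decide (pvOkOct [a,b,c] = true → [a,b,c] = PySem.Int.toChars (pvVal [a,b,c])))))) = true := by decide

-- a valid octet is the canonical decimal string of its value
theorem pvOkOct_canon (o : List Char) (h : pvOkOct o = true) : o = PySem.Int.toChars (pvVal o) := by
  have hlen := pvOkOct_len o h
  have hall : o.all pvIsDig = true := by
    simp only [pvOkOct, Bool.and_eq_true] at h; exact h.1.1.2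
  match o, hlen with
  | [], _ => simp [pvOkOct] at h
  | [a], _ =>
    have ha := pvDig_mem a (by simpa using hall)
    have := pvE1
    simp only [List.all_eq_true, decide_eq_true_eq] at this
    exact this a ha h
  | [a, b], _ =>
    simp only [List.all_cons, List.all_nil, Bool.and_eq_true] at hall
    have := pvE2
    simp only [List.all_eq_true, decide_eq_true_eq] at this
    exact this a (pvDig_mem a hall.1) b (pvDig_mem b hall.2.1) h
  | [a, b, c], _ =>
    simp only [List.all_cons, List.all_nil, Bool.and_eq_true] at hall
    have := pvE3
    simp only [List.all_eq_true, decide_eq_true_eq] at this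
    exact this a (pvDig_mem a hall.1) b (pvDig_mem b hall.2.1) c (pvDig_mem c hall.2.2.1) h

theorem pvOkOct_val_range (o : List Char) (h : pvOkOct o = true) : 0 ≤ pvVal o ∧ pvVal o ≤ 255 := by
  simp only [pvOkOct, Bool.and_eq_true, Bool.not_eq_true', decide_eq_false_iff_not] at h
  have h0 : 0 ≤ pvVal o := pvValFrom_nonneg o 0 le_rfl h.1.1.2
  have h255 : pvVal o ≤ 255 := by have := h.2; simp at this; omega
  exact ⟨h0, h255⟩

set_option maxRecDepth 8192 in
set_option maxHeartbeats 1000000 in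
theorem pvF1 : ((PySem.List.pyRange 0 256 1).all (fun v => pvOkOct (PySem.Int.toChars v))) = true := by decide
set_option maxRecDepth 8192 in
set_option maxHeartbeats 1000000 in
theorem pvF2 : ((PySem.List.pyRange 0 256 1).all (fun v => PySem.Int.ofChars? (PySem.Int.toChars v) == some v)) = true := by decide

theorem pvOctetOk_eq (o : List Char) : pvOctetOk o = pvOkOct o := by
  by_cases hB : pvOkOct o = true
  · -- B-valid ⇒ A-valid
    have hcanon := pvOkOct_canon o hB
    obtain ⟨h0, h255⟩ := pvOkOct_val_range o hB
    have hmem : pvVal o ∈ PySem.List.pyRange 0 256 1 := by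
      rw [PySem.List.mem_pyRange_one]; omega
    have hof : PySem.Int.ofChars? o = some (pvVal o) := by
      conv_lhs => rw [hcanon]
      have := pvF2
      simp only [List.all_eq_true, beq_iff_eq] at this
      exact this _ hmem
    rw [hB, pvOctetOk, hof]
    have hr : (pvVal o < 0 || 255 < pvVal o) = false := by simp; omega
    simp [hr, ← hcanon]
  · -- B-invalid ⇒ A-invalid
    rw [Bool.not_eq_true] at hB
    rw [hB, pvOctetOk]
    cases hof : PySem.Int.ofChars? o with
    | none => rfl
    | some v =>
      by_cases hr : (v < 0 || 255 < v) = true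
      · simp [hr]
      · simp only [hr, Bool.false_eq_true, if_false]
        by_cases hcan : o = PySem.Int.toChars v
        · exfalso
          have hv : v ∈ PySem.List.pyRange 0 256 1 := by
            rw [PySem.List.mem_pyRange_one]; simp at hr; omega
          have := pvF1
          simp only [List.all_eq_true] at this
          have hok := this v hv
          rw [← hcan] at hok
          rw [hok] at hB; simp at hB
        · simp [hcan]

-- === B's scan computes the split-based condition ===
theorem pvDotCond (p : List Char) (hall : p.all pvIsDig = true) :
    (decide ((p.length : Int) = 0) || decide (255 < pvVal p) || (decide (p.head? = some '0') && decide (1 < (p.length : Int)))) = !pvOkOct p := by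
  cases p with
  | nil => simp [pvOkOct, pvVal, pvValFrom]
  | cons c t =>
    simp only [pvOkOct, List.isEmpty_cons, Bool.not_false, hall, Bool.true_and,
      List.length_cons, List.head?_cons]
    push_cast
    by_cases h2 : c = '0'
    · subst h2
      by_cases h1 : (255 : Int) < pvVal ('0' :: t) <;>
        by_cases h3 : 0 < t.length <;>
          simp [h1, h3] <;> omega
    · by_cases h1 : (255 : Int) < pvVal (c :: t) <;>
        simp [h1, h2] <;> omega

theorem pvVal_append (p : List Char) (c : Char) :
    pvVal (p ++ [c]) = pvVal p * 10 + ((c.toNat : Int) - 48) := by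
  simp [pvVal, pvValFrom, List.foldl_append]

theorem pvScanB_spec (cs : List Char) : ∀ (d : Int) (p : List Char), p.all pvIsDig = true →
    pvScanB (cs ++ ['.']) d (p.length : Int) (pvVal p) (decide (p.head? = some '0')) =
      (if ((pvSplit cs).modifyHead (p ++ ·)).all pvOkOct then some (d + ((pvSplit cs).length : Int)) else none) := by
  induction cs with
  | nil =>
    intro d p hp
    simp only [List.nil_append, pvScanB, reduceIte, pvDotCond p hp, pvSplit]
    cases hok : pvOkOct p <;> simp [List.modifyHead, hok]
  | cons c rest ih =>
    intro d p hp
    obtain ⟨a, t, hat⟩ : ∃ a t, pvSplit rest = a :: t := by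
      cases h : pvSplit rest with
      | nil => exact absurd h (pvSplit_ne_nil rest)
      | cons a t => exact ⟨a, t, rfl⟩
    by_cases hc : c = '.'
    · subst hc
      have e1 : pvSplit ('.' :: rest) = [] :: pvSplit rest := by simp [pvSplit]
      simp only [List.cons_append, pvScanB, reduceIte, pvDotCond p hp]
      cases hok : pvOkOct p with
      | false =>
        simp only [Bool.not_false, if_true]
        rw [e1, hat]
        simp only [List.modifyHead_cons, List.append_nil, List.all_cons, hok, Bool.false_and,
          Bool.false_eq_true, if_false]
      | true =>
        simp only [Bool.not_true, Bool.false_eq_true, if_false]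
        have h0 : (([] : List Char).all pvIsDig) = true := rfl
        have hB := ih (d + 1) [] h0
        simp only [List.length_nil, Nat.cast_zero, List.head?_nil] at hB
        rw [show pvVal [] = 0 from rfl] at hB
        simp only [reduceCtorEq, decide_false] at hB
        rw [hB, e1, hat]
        simp only [List.modifyHead_cons, List.nil_append, List.append_nil, List.all_cons,
          hok, Bool.true_and, List.length_cons]
        split
        · congr 1; push_cast; ring
        · rfl
    · have e2 : pvSplit (c :: rest) = (pvSplit rest).modifyHead (c :: ·) := by
        simp [pvSplit, hc]
      by_cases hd : pvIsDig c
      · have hg : ('0' ≤ c && c ≤ '9') = true := hd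
        simp only [List.cons_append, pvScanB, hc, if_false, hg, if_true]
        have harg1 : ((p.length : Int) + 1) = (((p ++ [c]).length : Nat) : Int) := by
          simp
        have harg2 : pvVal p * 10 + ((c.toNat : Int) - 48) = pvVal (p ++ [c]) := (pvVal_append p c).symm
        have harg3 : (if (p.length : Int) = 0 then decide (c = '0') else decide (p.head? = some '0')) =
            decide ((p ++ [c]).head? = some '0') := by
          cases p with
          | nil => simp
          | cons h t =>
            rw [if_neg (by simp only [List.length_cons]; push_cast; omega)]
            simp
        rw [harg1, harg2, harg3, ih d (p ++ [c]) (by simp [List.all_append, hp, hd])]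
        rw [e2, hat]
        simp only [List.modifyHead_cons, List.append_assoc, List.singleton_append,
          List.all_cons, List.length_cons]
      · have hg : ('0' ≤ c && c ≤ '9') = false := by simpa [pvIsDig] using hd
        simp only [List.cons_append, pvScanB, hc, if_false, hg, Bool.false_eq_true]
        rw [e2, hat]
        have hbad : pvOkOct (p ++ c :: a) = false := by
          simp [pvOkOct, List.all_append, hd]
        simp only [List.modifyHead_cons, List.all_cons, hbad, Bool.false_and,
          Bool.false_eq_true, if_false]

-- ===== VERDICT (by name: the statement is the Claim_ definition above) =====
theorem is_valid_ip_port_py_spec : Claim_equal_is_valid_ip_port_py := by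
  intro ip port _
  unfold Spec_is_valid_ip_port_py
  have hs := pvScanB_spec ip.toList 0 []
  simp only [List.length_nil, Nat.cast_zero, List.head?_nil] at hs
  rw [show pvVal [] = 0 from rfl] at hs
  simp only [reduceCtorEq, decide_false] at hs
  have hs' := hs rfl
  obtain ⟨a, t, hat⟩ : ∃ a t, pvSplit ip.toList = a :: t := by
    cases h : pvSplit ip.toList with
    | nil => exact absurd h (pvSplit_ne_nil ip.toList)
    | cons a t => exact ⟨a, t, rfl⟩
  rw [hat] at hs'
  simp only [List.modifyHead_cons, List.nil_append] at hs'
  simp only [is_valid_ip_port_py, is_valid_ip_port_py_alt, pvSplitOn_eq, hat, hs']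
  rw [show pvOctetOk = pvOkOct from funext pvOctetOk_eq]
  by_cases hall : ((a :: t).all pvOkOct) = true
  · simp [hall]
    congr 1
    rcases eq_or_ne t.length 3 with h | h
    · simp [h]
    · simp [h]
      omega
  · simp [hall]
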